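-- pv_equiv track=rewrite | github.com/lpaiu-cs/self-mass-unobservability | symbolic/enumerate_basis.py | basis_report
-- ===== SOURCE A (Python) =====
-- from dataclasses import dataclass
-- from itertools import product
--
-- DEFAULT_MAX_WEIGHT = 4
--
-- @dataclass(frozen=True)
-- class Primitive:
--     name: str
--     weight: int
--     description: str
--
-- @dataclass(frozen=True)
-- class Monomial:
--     label: str
--     weight: int
--     exponents: tuple[int, ...]
--
-- def minimal_sector_primitives() -> tuple[Primitive, ...]:
--     return (
--         Primitive("E2", 2, "E_ij E^ij"),
--         Primitive("E3", 3, "E_i^j E_j^k E_k^i"),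
--         Primitive("dotE2", 4, "(D_tau E_ij)(D_tau E^ij)"),
--         Primitive("gradE2", 4, "(nabla_k E_ij)(nabla^k E^ij)"),
--     )
--
-- def format_monomial(
--     primitives: tuple[Primitive, ...], exponents: tuple[int, ...]
-- ) -> str:
--     factors: list[str] = []
--     for primitive, exponent in zip(primitives, exponents):
--         if exponent == 0:
--             continue
--         if exponent == 1:
--             factors.append(primitive.name)
--         else:
--             factors.append(f"{primitive.name}^{exponent}")
--     return " * ".join(factors) if factors else "1"
--
-- def enumerate_monomials(
--     primitives: tuple[Primitive, ...], max_weight: int = DEFAULT_MAX_WEIGHT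
-- ) -> tuple[Monomial, ...]:
--     if max_weight < 0:
--         raise ValueError("max_weight must be non-negative")
--     if any(primitive.weight <= 0 for primitive in primitives):
--         raise ValueError("primitive weights must be positive")
--
--     bounds = [max_weight // primitive.weight for primitive in primitives]
--     monomials: list[Monomial] = []
--     for exponents in product(*(range(bound + 1) for bound in bounds)):
--         weight = sum(
--             exponent * primitive.weight
--             for exponent, primitive in zip(exponents, primitives)
--         )
--         if weight > max_weight:
--             continue
--         monomials.append(
--             Monomial(
--                 label=format_monomial(primitives, exponents),
--                 weight=weight,
--                 exponents=tuple(exponents),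
--             )
--         )
--
--     monomials.sort(
--         key=lambda item: (item.weight, 0 if item.label == "1" else 1, item.label)
--     )
--     return tuple(monomials)
--
-- def enumerate_minimal_scalar_monomials(
--     max_weight: int = DEFAULT_MAX_WEIGHT,
-- ) -> tuple[Monomial, ...]:
--     return enumerate_monomials(minimal_sector_primitives(), max_weight=max_weight)
--
-- def basis_report(max_weight: int = DEFAULT_MAX_WEIGHT) -> str:
--     primitives = minimal_sector_primitives()
--     monomials = enumerate_minimal_scalar_monomials(max_weight=max_weight)
--
--     lines = [
--         f"Minimal-sector candidate scalar monomials through Delta <= {max_weight}",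
--         "",
--         "Primitive generators:",
--     ]
--     for primitive in primitives:
--         lines.append(
--             f"- {primitive.name} [weight {primitive.weight}]: {primitive.description}"
--         )
--
--     lines.extend(["", "Enumerated monomials:"])
--     for monomial in monomials:
--         lines.append(f"- weight {monomial.weight}: {monomial.label}")
--     return "\n".join(lines)
-- ===== SOURCE B (Python) =====
-- DEFAULT_MAX_WEIGHT = 4
--
-- _PRIMITIVES = (
--     ("E2", 2, "E_ij E^ij"),
--     ("E3", 3, "E_i^j E_j^k E_k^i"),
--     ("dotE2", 4, "(D_tau E_ij)(D_tau E^ij)"),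
--     ("gradE2", 4, "(nabla_k E_ij)(nabla^k E^ij)"),
-- )
--
-- def _search(prims, budget):
--     """Weight-budgeted recursion: yields (weight, factor-strings) pairs for every
--     exponent assignment whose total weight fits in the budget (no post-filter)."""
--     if not prims:
--         return [(0, [])]
--     name, w, _ = prims[0]
--     results = []
--     for e in range(budget // w + 1):
--         factor = [] if e == 0 else [name if e == 1 else f"{name}^{e}"]
--         for tail_weight, tail_factors in _search(prims[1:], budget - e * w):
--             results.append((e * w + tail_weight, factor + tail_factors))
--     return results
--
-- def basis_report(max_weight: int = DEFAULT_MAX_WEIGHT) -> str: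
--     if max_weight < 0:
--         raise ValueError("max_weight must be non-negative")
--     if any(w <= 0 for _, w, _ in _PRIMITIVES):
--         raise ValueError("primitive weights must be positive")
--
--     monomials = sorted(
--         (weight, " * ".join(factors) if factors else "1")
--         for weight, factors in _search(_PRIMITIVES, max_weight)
--     )
--
--     head = f"Minimal-sector candidate scalar monomials through Delta <= {max_weight}"
--     body = "\n\nPrimitive generators:"
--     for name, w, desc in _PRIMITIVES:
--         body += f"\n- {name} [weight {w}]: {desc}"
--     body += "\n\nEnumerated monomials:"
--     for weight, label in monomials:
--         body += f"\n- weight {weight}: {label}"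
--     return head + body
-- ===== Notes on version B (the rewrite author's own statement) =====
-- stated objective: faster
-- what changed: Replaces the full Cartesian product over per-primitive exponent bounds plus a weight post-filter and Monomial records by a weight-budgeted recursion that directly builds (weight, factor-list) pairs only for tuples fitting the remaining budget, sorts the (weight, label) pairs by plain tuple order instead of a three-component key, and accumulates the report by string concatenation instead of joining a list of lines.
import Mathlib
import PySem

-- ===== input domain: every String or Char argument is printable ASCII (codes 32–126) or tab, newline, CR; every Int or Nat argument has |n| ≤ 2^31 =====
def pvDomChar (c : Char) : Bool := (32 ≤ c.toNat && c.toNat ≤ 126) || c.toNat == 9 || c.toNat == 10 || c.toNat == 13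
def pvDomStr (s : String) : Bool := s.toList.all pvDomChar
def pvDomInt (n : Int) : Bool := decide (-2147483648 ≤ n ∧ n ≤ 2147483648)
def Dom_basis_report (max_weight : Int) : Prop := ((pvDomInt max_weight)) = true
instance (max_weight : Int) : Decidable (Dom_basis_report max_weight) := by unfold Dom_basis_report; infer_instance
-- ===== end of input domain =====

-- B replaces A's Cartesian-product-then-filter + Monomial records + list-of-lines join by a
-- weight-budgeted recursion that builds (weight, factors) pairs directly — only tuples fitting
-- the remaining budget are ever generated — sorts the (weight, label) pairs by plain tuple
-- order, and accumulates the report by string concatenation (objective: a faster enumeration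
-- that only visits budget-fitting tuples).

-- ===== PORT A =====

structure PvMono where
  label : String
  weight : Int
  exps : List Int
deriving DecidableEq, Repr

-- minimal_sector_primitives(): (name, weight, description)
def pvPrims : List (String × Int × String) :=
  [("E2", 2, "E_ij E^ij"),
   ("E3", 3, "E_i^j E_j^k E_k^i"),
   ("dotE2", 4, "(D_tau E_ij)(D_tau E^ij)"),
   ("gradE2", 4, "(nabla_k E_ij)(nabla^k E^ij)")]

-- format_monomial
def pvFormatMonomial (prims : List (String × Int × String)) (exps : List Int) : String :=
  let factors := (prims.zip exps).foldl (fun acc pe =>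
    if pe.2 = 0 then acc
    else if pe.2 = 1 then acc ++ [pe.1.1]
    else acc ++ [pe.1.1 ++ "^" ++ PySem.Int.toStr pe.2]) []
  if factors.isEmpty then "1" else PySem.Str.join " * " factors

-- weight = sum(exponent * primitive.weight for exponent, primitive in zip(exponents, primitives))
def pvWsum (prims : List (String × Int × String)) (exps : List Int) : Int :=
  ((exps.zip prims).map (fun ep => ep.1 * ep.2.2.1)).sum

-- monomials.sort(key=lambda item: (weight, 0 if label=='1' else 1, label)): Python tuple keys
-- compare lexicographically; a stable sort is the foldl of insertBy with the strict key order
def pvKeyFlag (m : PvMono) : Int := if m.label = "1" then 0 else 1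

def pvKeyLt (a b : PvMono) : Bool :=
  decide (a.weight < b.weight ∨ (a.weight = b.weight ∧
    (pvKeyFlag a < pvKeyFlag b ∨ (pvKeyFlag a = pvKeyFlag b ∧ a.label < b.label))))

def pvSortMono (xs : List PvMono) : List PvMono :=
  xs.foldl (fun acc x => PySem.List.insertBy (fun a b => pvKeyLt a b) x acc) []

-- "\n".join(lines): header, primitive lines, monomial lines, collected in a list first
def pvReport (max_weight : Int) (monomials : List PvMono) : String :=
  PySem.Str.join "\n"
    (["Minimal-sector candidate scalar monomials through Delta <= " ++ PySem.Int.toStr max_weight,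
      "", "Primitive generators:"]
     ++ pvPrims.map (fun p => "- " ++ p.1 ++ " [weight " ++ PySem.Int.toStr p.2.1 ++ "]: " ++ p.2.2)
     ++ ["", "Enumerated monomials:"]
     ++ monomials.map (fun m => "- weight " ++ PySem.Int.toStr m.weight ++ ": " ++ m.label))

-- itertools.product(*(range(bound + 1) for bound in bounds)): first range outermost
def pvProdTuples : List Int → List (List Int)
  | [] => [[]]
  | b :: rest => (PySem.List.pyRange 0 (b + 1) 1).flatMap
      (fun e => (pvProdTuples rest).map (fun t => e :: t))

def basis_report (max_weight : Int) : String :=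
  -- Python raises ValueError on max_weight < 0 (excluded by Pre_); "" stands for the exception
  if max_weight < 0 then ""
  else if pvPrims.any (fun p => p.2.1 ≤ 0) then ""  -- never fires for the fixed primitives
  else
    let bounds := pvPrims.map (fun p => PySem.Int.floordiv max_weight p.2.1)
    let monomials := (pvProdTuples bounds).foldl (fun acc exps =>
      let weight := pvWsum pvPrims exps
      if weight > max_weight then acc
      else acc ++ [⟨pvFormatMonomial pvPrims exps, weight, exps⟩]) []
    pvReport max_weight (pvSortMono monomials)

-- ===== PORT B =====

-- _PRIMITIVES (B keeps them as plain (name, weight, description) tuples)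
def pvPrimsB : List (String × Int × String) :=
  [("E2", 2, "E_ij E^ij"),
   ("E3", 3, "E_i^j E_j^k E_k^i"),
   ("dotE2", 4, "(D_tau E_ij)(D_tau E^ij)"),
   ("gradE2", 4, "(nabla_k E_ij)(nabla^k E^ij)")]

-- _search: weight-budgeted recursion producing (weight, factor-strings) pairs directly
def pvSearch : List (String × Int × String) → Int → List (Int × List String)
  | [], _ => [(0, [])]
  | p :: rest, budget =>
    (PySem.List.pyRange 0 (PySem.Int.floordiv budget p.2.1 + 1) 1).flatMap
      (fun e =>
        (pvSearch rest (budget - e * p.2.1)).map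
          (fun r => (e * p.2.1 + r.1,
            (if e = 0 then [] else if e = 1 then [p.1] else [p.1 ++ "^" ++ PySem.Int.toStr e])
              ++ r.2)))

def basis_report_alt (max_weight : Int) : String :=
  if max_weight < 0 then ""   -- ValueError in Python (excluded by Pre_)
  else if pvPrimsB.any (fun p => p.2.1 ≤ 0) then ""
  else
    -- sorted(...) on (weight, label) 2-tuples: Python compares them lexicographically
    let monomials := PySem.List.sorted2
      ((pvSearch pvPrimsB max_weight).map
        (fun r => (r.1, if r.2.isEmpty then "1" else PySem.Str.join " * " r.2)))
      (fun m => m.1) (fun m => m.2)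
    let head := "Minimal-sector candidate scalar monomials through Delta <= "
      ++ PySem.Int.toStr max_weight
    let body := pvPrimsB.foldl
      (fun s p => s ++ "\n- " ++ p.1 ++ " [weight " ++ PySem.Int.toStr p.2.1 ++ "]: " ++ p.2.2)
      "\n\nPrimitive generators:"
    let body2 := monomials.foldl
      (fun s m => s ++ "\n- weight " ++ PySem.Int.toStr m.1 ++ ": " ++ m.2)
      (body ++ "\n\nEnumerated monomials:")
    head ++ body2

-- ===== PRECONDITION & SPEC =====

-- Pre_ excludes exactly the inputs where Python A raises ValueError (negative max_weight)
def Pre_basis_report (max_weight : Int) : Prop := 0 ≤ max_weight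
instance (max_weight : Int) : Decidable (Pre_basis_report max_weight) := by
  unfold Pre_basis_report; infer_instance

def pvWitness_basis_report : Int := (4)

def Spec_basis_report (max_weight : Int) (out : String) : Prop := out = basis_report_alt max_weight
instance (max_weight : Int) (out : String) : Decidable (Spec_basis_report max_weight out) := by
  unfold Spec_basis_report; infer_instance

-- ===== CLAIM (what is proved, stated in full; the proofs are below) =====
def Claim_equal_basis_report : Prop := ∀ (max_weight : Int), Dom_basis_report max_weight → Pre_basis_report max_weight → Spec_basis_report max_weight (basis_report max_weight)

-- ===== LEMMAS AND PROOFS =====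

theorem pvWsum_cons (p : String × Int × String) (rest : List (String × Int × String))
    (e : Int) (t : List Int) :
    pvWsum (p :: rest) (e :: t) = e * p.2.1 + pvWsum rest t := by
  simp [pvWsum]

-- ghost enumeration used only by the proofs: the weight-budgeted exponent tuples
def pvGhost (prims : List (String × Int × String)) (budget : Int) : List (List Int) :=
  match prims with
  | [] => [[]]
  | p :: rest => (PySem.List.pyRange 0 (PySem.Int.floordiv budget p.2.1 + 1) 1).flatMap
      (fun e => (pvGhost rest (budget - e * p.2.1)).map (fun t => e :: t))

-- the factor list of format_monomial, as a flatMap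
def pvFacs (prims : List (String × Int × String)) (exps : List Int) : List String :=
  (prims.zip exps).flatMap (fun pe =>
    if pe.2 = 0 then [] else if pe.2 = 1 then [pe.1.1]
    else [pe.1.1 ++ "^" ++ PySem.Int.toStr pe.2])

theorem pvFormatMonomial_eq (prims : List (String × Int × String)) (exps : List Int) :
    pvFormatMonomial prims exps =
      if (pvFacs prims exps).isEmpty then "1" else PySem.Str.join " * " (pvFacs prims exps) := by
  have hstep : (fun (acc : List String) (pe : (String × Int × String) × Int) =>
      if pe.2 = 0 then acc
      else if pe.2 = 1 then acc ++ [pe.1.1]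
      else acc ++ [pe.1.1 ++ "^" ++ PySem.Int.toStr pe.2]) =
      (fun acc pe => acc ++ (if pe.2 = 0 then [] else if pe.2 = 1 then [pe.1.1]
        else [pe.1.1 ++ "^" ++ PySem.Int.toStr pe.2])) := by
    funext acc pe; split_ifs <;> simp
  simp only [pvFormatMonomial, hstep, PySem.List.foldl_append_eq_flatMap, List.nil_append, pvFacs]

-- every tuple produced by the product enumeration has nonnegative entries
theorem mem_prodTuples_nonneg : ∀ (bs : List Int) (t : List Int),
    t ∈ pvProdTuples bs → ∀ x ∈ t, 0 ≤ x := by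
  intro bs
  induction bs with
  | nil => intro t ht x hx; simp [pvProdTuples] at ht; subst ht; simp at hx
  | cons b rest ih =>
    intro t ht x hx
    simp only [pvProdTuples, List.mem_flatMap, List.mem_map] at ht
    obtain ⟨e, he, t', ht', rfl⟩ := ht
    rw [PySem.List.mem_pyRange_one] at he
    rcases List.mem_cons.mp hx with rfl | hx'
    · exact he.1
    · exact ih t' ht' x hx'

theorem pvWsum_nonneg : ∀ (prims : List (String × Int × String)) (t : List Int),
    (∀ p ∈ prims, 0 < p.2.1) → (∀ x ∈ t, 0 ≤ x) → 0 ≤ pvWsum prims t := by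
  intro prims
  induction prims with
  | nil => intro t _ _; simp [pvWsum]
  | cons p rest ih =>
    intro t hw ht
    cases t with
    | nil => simp [pvWsum]
    | cons e t' =>
      rw [pvWsum_cons]
      have h1 : 0 ≤ e * p.2.1 :=
        mul_nonneg (ht e (List.mem_cons_self)) (le_of_lt (hw p List.mem_cons_self))
      have h2 : 0 ≤ pvWsum rest t' :=
        ih t' (fun q hq => hw q (List.mem_cons_of_mem _ hq))
          (fun x hx => ht x (List.mem_cons_of_mem _ hx))
      omega

theorem pv_flatMap_congr {α β : Type} (l : List α) (f g : α → List β)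
    (h : ∀ x ∈ l, f x = g x) : l.flatMap f = l.flatMap g := by
  induction l with
  | nil => rfl
  | cons a l ih =>
    simp only [List.flatMap_cons]
    rw [h a List.mem_cons_self, ih (fun x hx => h x (List.mem_cons_of_mem _ hx))]

theorem pv_filter_flatMap {α β : Type} (l : List α) (f : α → List β) (q : β → Bool) :
    (l.flatMap f).filter q = l.flatMap (fun x => (f x).filter q) := by
  induction l with
  | nil => rfl
  | cons a l ih => simp [List.flatMap_cons, List.filter_append, ih]

-- the budgeted tuples equal the product enumeration post-filtered by weight
theorem pvGhost_eq_filter : ∀ (prims : List (String × Int × String)) (b mw : Int),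
    (∀ p ∈ prims, 0 < p.2.1) → 0 ≤ b → b ≤ mw →
    pvGhost prims b =
      (pvProdTuples (prims.map (fun p => PySem.Int.floordiv mw p.2.1))).filter
        (fun t => decide (pvWsum prims t ≤ b)) := by
  intro prims
  induction prims with
  | nil =>
    intro b mw _ hb _
    simp [pvGhost, pvProdTuples, pvWsum, hb]
  | cons p rest ih =>
    intro b mw hw hb hbmw
    have hwp : 0 < p.2.1 := hw p List.mem_cons_self
    have hwrest : ∀ q ∈ rest, 0 < q.2.1 := fun q hq => hw q (List.mem_cons_of_mem _ hq)
    have hfb : 0 ≤ PySem.Int.floordiv b p.2.1 :=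
      (PySem.Int.le_floordiv_iff_mul_le hwp).mpr (by omega)
    have hfbw : PySem.Int.floordiv b p.2.1 * p.2.1 ≤ b :=
      (PySem.Int.le_floordiv_iff_mul_le hwp).mp le_rfl
    have hmono : PySem.Int.floordiv b p.2.1 ≤ PySem.Int.floordiv mw p.2.1 :=
      (PySem.Int.le_floordiv_iff_mul_le hwp).mpr (le_trans hfbw hbmw)
    have hsplit := PySem.List.pyRange_one_append 0 (PySem.Int.floordiv b p.2.1 + 1)
      (PySem.Int.floordiv mw p.2.1 + 1) (by omega) (by omega)
    simp only [pvGhost, List.map_cons, pvProdTuples]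
    rw [pv_filter_flatMap, hsplit, List.flatMap_append]
    have hlow : ∀ e ∈ PySem.List.pyRange 0 (PySem.Int.floordiv b p.2.1 + 1) 1,
        ((pvProdTuples (rest.map (fun q => PySem.Int.floordiv mw q.2.1))).map
            (fun t => e :: t)).filter (fun t => decide (pvWsum (p :: rest) t ≤ b)) =
          (pvGhost rest (b - e * p.2.1)).map (fun t => e :: t) := by
      intro e he
      rw [PySem.List.mem_pyRange_one] at he
      have hew : e * p.2.1 ≤ b := by
        have : e ≤ PySem.Int.floordiv b p.2.1 := by omega
        calc e * p.2.1 ≤ PySem.Int.floordiv b p.2.1 * p.2.1 :=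
              mul_le_mul_of_nonneg_right this (le_of_lt hwp)
          _ ≤ b := hfbw
      have hew0 : 0 ≤ e * p.2.1 := mul_nonneg he.1 (le_of_lt hwp)
      rw [List.filter_map, ih (b - e * p.2.1) mw hwrest (by omega) (by omega)]
      congr 1
      apply List.filter_congr
      intro t _
      simp only [Function.comp, pvWsum_cons]
      exact decide_eq_decide.mpr (by omega)
    have hhigh : ∀ e ∈ PySem.List.pyRange (PySem.Int.floordiv b p.2.1 + 1)
        (PySem.Int.floordiv mw p.2.1 + 1) 1,
        ((pvProdTuples (rest.map (fun q => PySem.Int.floordiv mw q.2.1))).map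
            (fun t => e :: t)).filter (fun t => decide (pvWsum (p :: rest) t ≤ b)) =
          ([] : List (List Int)) := by
      intro e he
      rw [PySem.List.mem_pyRange_one] at he
      have heb : b < e * p.2.1 := by
        have : PySem.Int.floordiv b p.2.1 < e := by omega
        exact (PySem.Int.floordiv_lt_iff_lt_mul hwp).mp this
      rw [List.filter_map]
      rw [List.filter_eq_nil_iff.mpr ?_]
      · simp
      · intro t ht
        have h0 : 0 ≤ pvWsum rest t :=
          pvWsum_nonneg rest t hwrest (mem_prodTuples_nonneg _ t ht)
        simp only [Function.comp, pvWsum_cons]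
        simp only [decide_eq_true_eq]
        omega
    rw [pv_flatMap_congr _ _ _ hlow, pv_flatMap_congr _ _ _ hhigh]
    simp

-- B's recursion computes weight and factors of exactly the budgeted tuples
theorem pvSearch_eq : ∀ (prims : List (String × Int × String)) (b : Int),
    pvSearch prims b = (pvGhost prims b).map (fun t => (pvWsum prims t, pvFacs prims t)) := by
  intro prims
  induction prims with
  | nil => intro b; simp [pvSearch, pvGhost, pvWsum, pvFacs]
  | cons p rest ih =>
    intro b
    simp only [pvSearch, pvGhost, List.map_flatMap]
    apply pv_flatMap_congr
    intro e _
    rw [ih]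
    simp only [List.map_map]
    apply List.map_congr_left
    intro t _
    simp [Function.comp, pvWsum_cons, pvFacs]

-- A's accumulate loop ('if weight > max: continue; append(build(x))') as filter + map
theorem pv_foldl_skip {α β : Type} (p : α → Prop) [DecidablePred p] (f : α → β) :
    ∀ (l : List α) (acc : List β),
    l.foldl (fun acc x => if p x then acc else acc ++ [f x]) acc =
      acc ++ (l.filter (fun x => decide (¬ p x))).map f := by
  intro l
  induction l with
  | nil => intro acc; simp
  | cons a l ih =>
    intro acc
    by_cases hp : p a <;> simp [List.foldl_cons, hp, ih]

-- labels: either "1" or strictly greater than "1" in Python's string order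
def pvLabelOK (s : String) : Prop := s = "1" ∨ "1" < s

-- every primitive name starts with a character above '1'
theorem pvPrims_head : ∀ p ∈ pvPrims, ∃ c rest, p.1.toList = c :: rest ∧ '1' < c := by
  intro p hp
  fin_cases hp
  · exact ⟨'E', ['2'], rfl, by decide⟩
  · exact ⟨'E', ['3'], rfl, by decide⟩
  · exact ⟨'d', ['o','t','E','2'], rfl, by decide⟩
  · exact ⟨'g', ['r','a','d','E','2'], rfl, by decide⟩

theorem pvFacs_head : ∀ (t : List Int) (f : String), f ∈ pvFacs pvPrims t →
    ∃ c rest, f.toList = c :: rest ∧ '1' < c := by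
  intro t f hf
  simp only [pvFacs, List.mem_flatMap] at hf
  obtain ⟨pe, hpe, hmem⟩ := hf
  have hp : pe.1 ∈ pvPrims := List.of_mem_zip hpe |>.1
  obtain ⟨c, rest, hcl, hc⟩ := pvPrims_head pe.1 hp
  split_ifs at hmem with h0 h1
  · simp at hmem
  · simp at hmem; subst hmem; exact ⟨c, rest, hcl, hc⟩
  · simp at hmem; subst hmem
    refine ⟨c, rest ++ ("^" ++ PySem.Int.toStr pe.2).toList, ?_, hc⟩
    simp [String.toList_append, hcl]

theorem pvLabelOK_fmt (t : List Int) : pvLabelOK (pvFormatMonomial pvPrims t) := by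
  rw [pvFormatMonomial_eq]
  rcases hfl : pvFacs pvPrims t with _ | ⟨f, fs⟩
  · left; simp
  · right
    simp only [List.isEmpty_cons, if_neg (by decide : ¬ false = true)]
    have hf : f ∈ pvFacs pvPrims t := by rw [hfl]; exact List.mem_cons_self
    obtain ⟨c, rest, hcl, hc⟩ := pvFacs_head t f hf
    have hjoin : ∃ tail, (PySem.Str.join " * " (f :: fs)).toList = f.toList ++ tail := by
      cases fs with
      | nil =>
        refine ⟨[], ?_⟩
        simp [PySem.Str.toList_join, PySem.Chars.join_singleton]
      | cons g gs =>
        refine ⟨(" * " : String).toList ++ PySem.Chars.join (" * ").toList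
          (List.map String.toList (g :: gs)), ?_⟩
        simp [PySem.Str.toList_join, PySem.Chars.join_cons_cons]
    obtain ⟨tail, htl⟩ := hjoin
    rw [String.lt_iff_toList_lt, htl, hcl]
    show ('1' :: []) < c :: (rest ++ tail)
    exact List.cons_lt_cons_iff.mpr (Or.inl hc)

-- inserting through a map: the comparator only ever sees mapped elements
theorem pv_insertBy_map {α β : Type} (f : α → β) (bef : α → α → Bool) (bef' : β → β → Bool)
    (x : α) : ∀ (ys : List α), (∀ y ∈ ys, bef' (f x) (f y) = bef x y) →
    PySem.List.insertBy bef' (f x) (ys.map f) = (PySem.List.insertBy bef x ys).map f := by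
  intro ys
  induction ys with
  | nil => intro _; simp [PySem.List.insertBy]
  | cons y ys ih =>
    intro h
    simp only [List.map_cons, PySem.List.insertBy]
    rw [h y List.mem_cons_self]
    by_cases hb : bef x y
    · simp [hb]
    · simp only [hb, Bool.false_eq_true, if_false, List.map_cons]
      rw [ih (fun z hz => h z (List.mem_cons_of_mem _ hz))]

theorem pv_foldl_insertBy_map {α β : Type} (f : α → β) (bef : α → α → Bool)
    (bef' : β → β → Bool) (P : α → Prop)
    (hP : ∀ a b, P a → P b → bef' (f a) (f b) = bef a b) :
    ∀ (xs acc : List α), (∀ x ∈ xs, P x) → (∀ x ∈ acc, P x) →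
    (xs.map f).foldl (fun acc x => PySem.List.insertBy bef' x acc) (acc.map f) =
      (xs.foldl (fun acc x => PySem.List.insertBy bef x acc) acc).map f := by
  intro xs
  induction xs with
  | nil => intro acc _ _; simp
  | cons x xs ih =>
    intro acc hxs hacc
    simp only [List.map_cons, List.foldl_cons]
    rw [pv_insertBy_map f bef bef' x acc
      (fun y hy => hP x y (hxs x List.mem_cons_self) (hacc y hy))]
    exact ih (PySem.List.insertBy bef x acc)
      (fun z hz => hxs z (List.mem_cons_of_mem _ hz))
      (fun z hz => by
        rcases (PySem.List.mem_insertBy _ _ _ _).mp hz with rfl | hz'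
        · exact hxs z List.mem_cons_self
        · exact hacc z hz')

-- the pair comparator of sorted2 agrees with A's triple key on OK labels
theorem pv_cmp_agree (a b : PvMono) (ha : pvLabelOK a.label) (hb : pvLabelOK b.label) :
    (decide (a.weight < b.weight) ||
      (!decide (b.weight < a.weight) && decide (a.label < b.label))) = pvKeyLt a b := by
  unfold pvKeyLt pvKeyFlag
  by_cases h1 : a.weight < b.weight
  · simp [h1]
  · by_cases h2 : b.weight < a.weight
    · simp [h1, h2, show a.weight ≠ b.weight by omega]
    · have heq : a.weight = b.weight := by omega
      have hL : (decide (a.weight < b.weight) ||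
          (!decide (b.weight < a.weight) && decide (a.label < b.label))) =
          decide (a.label < b.label) := by simp [h1, h2]
      rw [hL, decide_eq_decide]
      constructor
      · intro hlt
        refine Or.inr ⟨heq, ?_⟩
        rcases ha with ha1 | ha1
        · rcases hb with hb1 | hb1
          · exact absurd (ha1 ▸ hb1 ▸ hlt) (lt_irrefl _)
          · have hbne : b.label ≠ "1" := fun hh => absurd (hh ▸ hb1) (lt_irrefl _)
            exact Or.inl (by simp [ha1, hbne])
        · have hane : a.label ≠ "1" := fun hh => absurd (hh ▸ ha1) (lt_irrefl _)
          rcases hb with hb1 | hb1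
          · exact absurd (lt_trans ha1 (hb1 ▸ hlt)) (lt_irrefl _)
          · have hbne : b.label ≠ "1" := fun hh => absurd (hh ▸ hb1) (lt_irrefl _)
            exact Or.inr ⟨by simp [hane, hbne], hlt⟩
      · intro hor
        rcases hor with hw | ⟨_, hf⟩
        · exact absurd hw h1
        · rcases hf with hf | ⟨_, hlt⟩
          · by_cases ha1 : a.label = "1" <;> by_cases hb1 : b.label = "1" <;>
                simp [ha1, hb1] at hf
            rcases hb with hb' | hb'
            · exact absurd hb' hb1
            · rw [ha1]; exact hb'
          · exact hlt

-- ----- report plumbing: "\n".join(lines) versus incremental concatenation -----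

def pvLF (init : String) (ls : List String) : String :=
  ls.foldl (fun s l => s ++ "\n" ++ l) init

theorem pvLF_append : ∀ (ls : List String) (a b : String), a ++ pvLF b ls = pvLF (a ++ b) ls := by
  intro ls
  induction ls with
  | nil => intro a b; rfl
  | cons l ls ih =>
    intro a b
    simp only [pvLF, List.foldl_cons] at *
    rw [← ih, ← ih]
    simp [String.append_assoc]

theorem pv_join_eq_lf : ∀ (xs : List String) (x : String),
    PySem.Str.join "\n" (x :: xs) = pvLF x xs := by
  intro xs
  induction xs with
  | nil =>
    intro x
    apply String.toList_injective
    simp [PySem.Str.toList_join, PySem.Chars.join_singleton, pvLF]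
  | cons y ys ih =>
    intro x
    have hstep : PySem.Str.join "\n" (x :: y :: ys) = x ++ "\n" ++ PySem.Str.join "\n" (y :: ys) := by
      apply String.toList_injective
      simp [PySem.Str.toList_join, PySem.Chars.join_cons_cons, String.toList_append]
    rw [hstep, ih, pvLF_append]
    rfl

theorem pvLF_app_lines (init : String) (xs ys : List String) :
    pvLF init (xs ++ ys) = pvLF (pvLF init xs) ys := by
  simp [pvLF, List.foldl_append]

-- ===== VERDICT (by name: the statement is the Claim_ definition above) =====
theorem basis_report_spec : Claim_equal_basis_report := by
  intro mw _ hpre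
  have hb : 0 ≤ mw := hpre
  unfold Spec_basis_report basis_report basis_report_alt
  have hneg : ¬ mw < 0 := by omega
  simp only [hneg, if_false]
  have hany : pvPrims.any (fun p => p.2.1 ≤ 0) = false := by decide
  have hanyB : pvPrimsB.any (fun p => p.2.1 ≤ 0) = false := by decide
  simp only [hany, hanyB, Bool.false_eq_true, if_false]
  have hPB : pvPrimsB = pvPrims := rfl
  -- the unsorted monomial list A builds
  set ts := (pvProdTuples (pvPrims.map (fun p => PySem.Int.floordiv mw p.2.1))).filter
      (fun t => decide (pvWsum pvPrims t ≤ mw)) with hts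
  have hmonosA :
      (pvProdTuples (pvPrims.map (fun p => PySem.Int.floordiv mw p.2.1))).foldl
        (fun acc exps =>
          let weight := pvWsum pvPrims exps
          if weight > mw then acc
          else acc ++ [⟨pvFormatMonomial pvPrims exps, weight, exps⟩]) [] =
      ts.map (fun exps => (⟨pvFormatMonomial pvPrims exps, pvWsum pvPrims exps, exps⟩ : PvMono)) := by
    rw [pv_foldl_skip (fun exps => pvWsum pvPrims exps > mw)
      (fun exps => (⟨pvFormatMonomial pvPrims exps, pvWsum pvPrims exps, exps⟩ : PvMono))]
    rw [List.nil_append, hts]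
    congr 1
    apply List.filter_congr
    intro t _
    exact decide_eq_decide.mpr (by omega)
  rw [hmonosA]
  set monosA := ts.map (fun exps =>
    (⟨pvFormatMonomial pvPrims exps, pvWsum pvPrims exps, exps⟩ : PvMono)) with hmA
  -- B's pre-sort pairs are A's monomials through (weight, label)
  have hpairs : (pvSearch pvPrimsB mw).map
      (fun r => (r.1, if r.2.isEmpty then "1" else PySem.Str.join " * " r.2)) =
      monosA.map (fun m => (m.weight, m.label)) := by
    rw [hPB, pvSearch_eq, pvGhost_eq_filter pvPrims mw mw (by decide) hb le_rfl, ← hts, hmA]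
    simp only [List.map_map]
    apply List.map_congr_left
    intro t _
    simp [Function.comp, pvFormatMonomial_eq]
  rw [hpairs]
  -- the sorts agree
  have hok : ∀ m ∈ monosA, pvLabelOK m.label := by
    intro m hm
    rw [hmA] at hm
    obtain ⟨t, _, rfl⟩ := List.mem_map.mp hm
    exact pvLabelOK_fmt t
  have hsort : PySem.List.sorted2 (monosA.map (fun m => (m.weight, m.label)))
      (fun m => m.1) (fun m => m.2) =
      (pvSortMono monosA).map (fun m => (m.weight, m.label)) := by
    simp only [PySem.List.sorted2, if_neg (by decide : ¬ (false = true)), pvSortMono]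
    have := pv_foldl_insertBy_map (fun (m : PvMono) => (m.weight, m.label))
      (fun a b => pvKeyLt a b)
      (fun a b => decide (a.1 < b.1) || (!decide (b.1 < a.1) && decide (a.2 < b.2)))
      (fun m => pvLabelOK m.label)
      (fun a b ha hb => pv_cmp_agree a b ha hb)
      monosA [] (hok) (by simp)
    simpa using this
  rw [hsort]
  -- the two report builders produce the same string
  set ms := pvSortMono monosA with hms
  show pvReport mw ms = _
  unfold pvReport
  set head := "Minimal-sector candidate scalar monomials through Delta <= " ++ PySem.Int.toStr mw
    with hhead
  set primLines := pvPrims.map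
    (fun p => "- " ++ p.1 ++ " [weight " ++ PySem.Int.toStr p.2.1 ++ "]: " ++ p.2.2) with hpl
  set monoLines := ms.map
    (fun m => "- weight " ++ PySem.Int.toStr m.weight ++ ": " ++ m.label) with hml
  simp only [List.cons_append, List.nil_append, List.append_assoc]
  rw [pv_join_eq_lf]
  rw [show ("" : String) :: "Primitive generators:" ::
      (primLines ++ "" :: "Enumerated monomials:" :: monoLines) =
      (["", "Primitive generators:"] ++ primLines)
        ++ (["", "Enumerated monomials:"] ++ monoLines) by simp]
  rw [pvLF_app_lines head (["", "Primitive generators:"] ++ primLines)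
      (["", "Enumerated monomials:"] ++ monoLines)]
  rw [pvLF_app_lines head ["", "Primitive generators:"] primLines]
  rw [pvLF_app_lines _ ["", "Enumerated monomials:"] monoLines]
  have h1 : pvLF head ["", "Primitive generators:"] = head ++ "\n\nPrimitive generators:" := by
    simp only [pvLF, List.foldl_cons, List.foldl_nil, String.append_assoc]
    rfl
  have h4 : ∀ s : String, pvLF s ["", "Enumerated monomials:"] =
      s ++ "\n\nEnumerated monomials:" := by
    intro s
    simp only [pvLF, List.foldl_cons, List.foldl_nil, String.append_assoc]
    rfl
  have hBprim : pvPrimsB.foldl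
      (fun s p => s ++ "\n- " ++ p.1 ++ " [weight " ++ PySem.Int.toStr p.2.1 ++ "]: " ++ p.2.2)
      "\n\nPrimitive generators:" = pvLF "\n\nPrimitive generators:" primLines := by
    rw [hPB, hpl, pvLF, List.foldl_map]
    apply PySem.List.foldl_congr_mem
    intro acc p _
    have hsp : ("\n- " : String) = "\n" ++ "- " := rfl
    simp only [String.append_assoc]
    rw [hsp, String.append_assoc]
  have hBmono : ∀ init : String, (ms.map (fun m => (m.weight, m.label))).foldl
      (fun s m => s ++ "\n- weight " ++ PySem.Int.toStr m.1 ++ ": " ++ m.2) init =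
      pvLF init monoLines := by
    intro init
    rw [hml, pvLF, List.foldl_map, List.foldl_map]
    apply PySem.List.foldl_congr_mem
    intro acc m _
    have hsp : ("\n- weight " : String) = "\n" ++ "- weight " := rfl
    simp only [String.append_assoc]
    rw [hsp, String.append_assoc]
  rw [hBmono, hBprim, pvLF_append, ← String.append_assoc, pvLF_append, h1, h4]
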